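-- pv_equiv track=rewrite | github.com/hotmaps-docker/gollum | wikitranslate/preprocessing/preprocess.py | lower_case_linkage
-- ===== SOURCE A (Python) =====
-- def lower_case_linkage (lines, start_symbol = '(#', stop_symbol = ')'):
--         processed = []
--         for i in lines:
--                 start = 0
--                 # in each line there might be more than one reference, hence check the whole line
--                 # until there are no more occurences.
--                 # obviously the loop will never break at this point...
--                 while start >= 0:
--                         # get the start index and stop index of '(#Some-Header-In-The-File)'
--                         start = i.find(start_symbol, start)
--                         stop  = i.find(stop_symbol, start)
--
--                         # ... but at this point.
--                         if start < 0:
--                                 break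
--
--                         # wrong is the anchor name with upper case symbols. indices are set
--                         # such that start and stop symbol are not included in the string.
--                         wrong = i[start : stop+1]
--                         correct = wrong.lower()
--
--                         # change line from text file
--                         i = i.replace(wrong, correct)
--                         start = stop
--                 processed.append(i)
--         return processed
-- ===== SOURCE B (Python) =====
-- def lower_case_linkage(lines, start_symbol='(#', stop_symbol=')'):
--     processed = []
--     for line in lines:
--         # single forward pass: emit text up to each anchor, lowercase the
--         # "(#...)" span, and continue scanning only the remaining suffix
--         chunks = []
--         rest = line
--         while True:
--             s = rest.find(start_symbol)
--             if s < 0: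
--                 break
--             t = rest.find(stop_symbol, s)
--             if t < 0:
--                 break
--             chunks.append(rest[:s] + rest[s:t+1].lower())
--             rest = rest[t+1:]
--         chunks.append(rest)
--         processed.append(''.join(chunks))
--     return processed
-- ===== Notes on version B (the rewrite author's own statement) =====
-- stated objective: alternative
-- what changed: A repeatedly re-scans and rebuilds the whole line (find from an advancing index plus a whole-line replace-all per anchor); B makes a single forward pass per line, emitting the text before each anchor, lowercasing the '(#...)' span, and continuing only on the remaining suffix (intended as faster; measured only ~1.25x at the largest generated size, so not claimed).
-- outside the precondition, e.g. on lower_case_linkage(['#A#(#AA'], '#', 'A'): A returns ['#a#(#aa'], B returns ['#a#(#aA']; on lower_case_linkage(['ba#A()#A('], '#', '()'): A returns ['ba#a()#a('], B returns ['ba#a()#A(']; on lower_case_linkage(['x(#y'], '(', '(#'): A does not finish within the time limit, B returns ['x(#y']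
import Mathlib
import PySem

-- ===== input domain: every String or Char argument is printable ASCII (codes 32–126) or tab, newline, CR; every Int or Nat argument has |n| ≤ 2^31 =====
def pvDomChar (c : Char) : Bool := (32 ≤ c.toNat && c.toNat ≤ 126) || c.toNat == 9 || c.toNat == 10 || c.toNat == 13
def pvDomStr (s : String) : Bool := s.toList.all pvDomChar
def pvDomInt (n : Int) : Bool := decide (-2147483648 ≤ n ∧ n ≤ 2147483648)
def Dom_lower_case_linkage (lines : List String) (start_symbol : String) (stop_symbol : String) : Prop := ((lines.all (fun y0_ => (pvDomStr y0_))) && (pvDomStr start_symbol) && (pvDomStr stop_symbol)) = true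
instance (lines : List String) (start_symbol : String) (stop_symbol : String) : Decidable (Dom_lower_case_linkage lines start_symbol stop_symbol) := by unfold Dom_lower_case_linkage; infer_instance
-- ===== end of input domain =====

-- B replaces A's per-anchor whole-line replace-all loop by a single forward pass per
-- line that lowercases each '(#...)' span and scans only the remaining suffix
-- (objective: alternative); equality is proved on Pre_ below.

-- ===== PORT A =====
-- the 'while start >= 0' loop of A, one fuel unit per iteration (fuel = len+2 is
-- enough for every input admitted by Pre_; Python computes 'stop' before the
-- 'if start < 0: break' test but never uses it on that path, so it is computed
-- only on the surviving branch here)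
def pvALoop (ss ts : List Char) : Nat → List Char → Int → List Char
  | 0, i, _ => i
  | fuel+1, i, start =>
    if start < 0 then i
    else
      let s := PySem.Chars.findFrom i ss start
      if s < 0 then i
      else
        let stop := PySem.Chars.findFrom i ts s
        let wrong := PySem.Chars.slice i (some s) (some (stop+1))
        pvALoop ss ts fuel (PySem.Chars.replace i wrong (PySem.Chars.lower wrong)) stop

def lower_case_linkage (lines : List String) (start_symbol : String) (stop_symbol : String) : List String :=
  lines.map (fun i => String.ofList
    (pvALoop start_symbol.toList stop_symbol.toList (i.toList.length + 2) i.toList 0))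

-- ===== PORT B =====
-- B's 'while True' loop: chop the line at each processed anchor, keep finished
-- chunks in an accumulator, scan only the remaining suffix
def pvBLoop (ss ts : List Char) : Nat → List Char → List (List Char) → List (List Char)
  | 0, rest, chunks => chunks ++ [rest]
  | fuel+1, rest, chunks =>
    let s := PySem.Chars.find rest ss
    if s < 0 then chunks ++ [rest]
    else
      let t := PySem.Chars.findFrom rest ts s
      if t < 0 then chunks ++ [rest]
      else pvBLoop ss ts fuel (PySem.Chars.slice rest (some (t+1)) none)
             (chunks ++ [PySem.Chars.slice rest none (some s) ++ PySem.Chars.lower (PySem.Chars.slice rest (some s) (some (t+1)))])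

def lower_case_linkage_alt (lines : List String) (start_symbol : String) (stop_symbol : String) : List String :=
  lines.map (fun line => String.ofList
    (PySem.Chars.join [] (pvBLoop start_symbol.toList stop_symbol.toList (line.toList.length + 2) line.toList [])))

-- ===== PRECONDITION & SPEC =====
def pvLetterFree (c : Char) : Bool := !((65 ≤ c.toNat && c.toNat ≤ 90) || (97 ≤ c.toNat && c.toNat ≤ 122))

-- Pre_ admits every input in which some symbol is absent from every line (A then
-- returns the lines unchanged), and otherwise requires the symbols to be of the
-- shape the function is written for: a non-empty start symbol, a one-character stop
-- symbol, no letters in either (A lower-cases text mid-run, so letters in a symbol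
-- make later find/replace steps hit or miss accidentally and A's result is an
-- artefact of its replace-all implementation), and stop not a prefix of start
-- (on such prefix-related symbol pairs A's 'start = stop' loop can spin forever).
def Pre_lower_case_linkage (lines : List String) (start_symbol : String) (stop_symbol : String) : Prop :=
  (lines.all (fun line => !(PySem.Str.isIn start_symbol line) || !(PySem.Str.isIn stop_symbol line))) = true
  ∨ (start_symbol.toList ≠ [] ∧ stop_symbol.toList.length = 1
      ∧ start_symbol.toList.all pvLetterFree = true
      ∧ stop_symbol.toList.all pvLetterFree = true
      ∧ ¬ stop_symbol.toList.IsPrefix start_symbol.toList)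

instance (lines : List String) (start_symbol : String) (stop_symbol : String) : Decidable (Pre_lower_case_linkage lines start_symbol stop_symbol) := by unfold Pre_lower_case_linkage; infer_instance

def pvWitness_lower_case_linkage : List String × String × String :=
  (["(#A) x", "ok"], "(#", ")")

def Spec_lower_case_linkage (lines : List String) (start_symbol : String) (stop_symbol : String) (out : List String) : Prop := out = lower_case_linkage_alt lines start_symbol stop_symbol
instance (lines : List String) (start_symbol : String) (stop_symbol : String) (out : List String) : Decidable (Spec_lower_case_linkage lines start_symbol stop_symbol out) := by unfold Spec_lower_case_linkage; infer_instance

-- ===== CLAIM (what is proved, stated in full; the proofs are below) =====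
def Claim_equal_lower_case_linkage : Prop := ∀ (lines : List String) (start_symbol : String) (stop_symbol : String), Dom_lower_case_linkage lines start_symbol stop_symbol → Pre_lower_case_linkage lines start_symbol stop_symbol → Spec_lower_case_linkage lines start_symbol stop_symbol (lower_case_linkage lines start_symbol stop_symbol)

-- ===== LEMMAS AND PROOFS =====

-- character access with a default (all statements below use it)
def pvAt (l : List Char) (q : Nat) : Char := l.getD q ' '

-- occurrence of sub at position r
def pvOcc (sub l : List Char) (r : Nat) : Prop := sub <+: l.drop r

-- B's scan as a structurally recursive function on the suffix (proof-side spec)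
def pvBlow (ss ts : List Char) (rest : List Char) : List Char :=
  if hr : rest.length = 0 then rest
  else
    let s := PySem.Chars.find rest ss
    if hs : s < 0 then rest
    else
      let t := PySem.Chars.findFrom rest ts s
      if ht : t < 0 then rest
      else
        rest.take s.toNat
          ++ PySem.Chars.lower ((rest.drop s.toNat).take (t.toNat + 1 - s.toNat))
          ++ pvBlow ss ts (rest.drop (t.toNat + 1))
termination_by rest.length
decreasing_by
  · simp only [List.length_drop]; omega

-- greedy replace, proof-side mirror of PySem.Chars.replace.go
def pvGrep (old new : List Char) : List Char → List Char
  | [] => []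
  | c :: t =>
    if h : old ≠ [] ∧ old.isPrefixOf (c :: t) then new ++ pvGrep old new ((c :: t).drop old.length)
    else c :: pvGrep old new t
termination_by l => l.length
decreasing_by
  · have : old.length ≥ 1 := by
      rcases h with ⟨h1, _⟩
      cases old with | nil => simp at h1 | cons a b => simp
    simp [List.length_drop]; omega
  · simp


-- ---------- character-level facts ----------
theorem pvChar_le_iff {a b : Char} : a ≤ b ↔ a.toNat ≤ b.toNat := by
  rw [Char.le_def]; exact UInt32.le_iff_toNat_le

theorem pvUpper_iff {c : Char} : PySem.Chars.isupper c = true ↔ 65 ≤ c.toNat ∧ c.toNat ≤ 90 := by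
  unfold PySem.Chars.isupper
  simp [pvChar_le_iff]

theorem pvLF_iff {c : Char} : pvLetterFree c = true ↔ ¬(65 ≤ c.toNat ∧ c.toNat ≤ 90) ∧ ¬(97 ≤ c.toNat ∧ c.toNat ≤ 122) := by
  unfold pvLetterFree
  simp
  omega

theorem pvLch_of_not_upper {c : Char} (h : PySem.Chars.isupper c = false) :
    PySem.Chars.lowerChar c = c := by
  unfold PySem.Chars.lowerChar; simp [h]

theorem pvLch_toNat_of_upper {c : Char} (h : PySem.Chars.isupper c = true) :
    (PySem.Chars.lowerChar c).toNat = c.toNat + 32 := by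
  unfold PySem.Chars.lowerChar
  rw [if_pos h, Char.toNat_ofNat, if_pos]
  exact Or.inl (by have := (pvUpper_iff.mp h); omega)

theorem pvLch_LF_fix {c : Char} (h : pvLetterFree c = true) : PySem.Chars.lowerChar c = c := by
  apply pvLch_of_not_upper
  rcases (pvLF_iff.mp h) with ⟨h1, _⟩
  cases hu : PySem.Chars.isupper c
  · rfl
  · exact absurd (pvUpper_iff.mp hu) h1

theorem pvLch_idem (c : Char) : PySem.Chars.lowerChar (PySem.Chars.lowerChar c) = PySem.Chars.lowerChar c := by
  cases hu : PySem.Chars.isupper c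
  · rw [pvLch_of_not_upper hu, pvLch_of_not_upper hu]
  · have ht := pvLch_toNat_of_upper hu
    have hb := pvUpper_iff.mp hu
    apply pvLch_of_not_upper
    cases hu2 : PySem.Chars.isupper (PySem.Chars.lowerChar c)
    · rfl
    · have := pvUpper_iff.mp hu2; omega

theorem pvLch_eq_LF_iff {c d : Char} (hd : pvLetterFree d = true) :
    PySem.Chars.lowerChar c = d ↔ c = d := by
  cases hu : PySem.Chars.isupper c
  · rw [pvLch_of_not_upper hu]
  · have ht := pvLch_toNat_of_upper hu
    have hb := pvUpper_iff.mp hu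
    have hdn := pvLF_iff.mp hd
    constructor
    · intro h; exfalso; rw [h] at ht; omega
    · intro h; exfalso; subst h; omega

-- ---------- pvAt access lemmas ----------
theorem pvAt_eq_getD (l : List Char) (q : Nat) : pvAt l q = (l[q]?).getD ' ' := by
  simp [pvAt, List.getD_eq_getElem?_getD]

theorem pvAt_drop (l : List Char) (k q : Nat) : pvAt (l.drop k) q = pvAt l (k + q) := by
  simp [pvAt_eq_getD, List.getElem?_drop]

theorem pvAt_take {l : List Char} {k q : Nat} (h : q < k) : pvAt (l.take k) q = pvAt l q := by
  simp [pvAt_eq_getD, List.getElem?_take, h]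

theorem pvAt_append_left {a b : List Char} {q : Nat} (h : q < a.length) :
    pvAt (a ++ b) q = pvAt a q := by
  simp [pvAt_eq_getD, List.getElem?_append_left h]

theorem pvAt_append_right (a b : List Char) (q : Nat) :
    pvAt (a ++ b) (a.length + q) = pvAt b q := by
  simp [pvAt_eq_getD, List.getElem?_append_right (by omega : a.length ≤ a.length + q)]

theorem pvAt_map {f : Char → Char} {l : List Char} {q : Nat} (h : q < l.length) :
    pvAt (l.map f) q = f (pvAt l q) := by
  simp [pvAt_eq_getD, List.getElem?_map, List.getElem?_eq_getElem h]

theorem pvAt_oob {l : List Char} {q : Nat} (h : l.length ≤ q) : pvAt l q = ' ' := by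
  simp [pvAt_eq_getD, List.getElem?_eq_none h]

-- ---------- occurrences ----------
theorem pvPrefix_iff {sub m : List Char} :
    sub <+: m ↔ sub.length ≤ m.length ∧ ∀ j, j < sub.length → pvAt m j = pvAt sub j := by
  rw [List.prefix_iff_eq_take]
  constructor
  · intro h
    have hl : sub.length ≤ m.length := by
      conv_lhs => rw [h]
      simp
    refine ⟨hl, fun j hj => ?_⟩
    conv_rhs => rw [h]
    rw [pvAt_take hj]
  · rintro ⟨hl, hj⟩
    apply List.ext_getElem?
    intro j
    by_cases hcase : j < sub.length
    · rw [List.getElem?_take, if_pos hcase]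
      have := hj j hcase
      rw [pvAt_eq_getD, pvAt_eq_getD] at this
      rw [List.getElem?_eq_getElem (by omega : j < m.length), List.getElem?_eq_getElem hcase] at *
      simp at this ⊢
      exact this.symm
    · rw [List.getElem?_eq_none (by omega : sub.length ≤ j), List.getElem?_take]
      simp [hcase]

theorem pvOcc_iff {sub l : List Char} {r : Nat} (hsub : sub ≠ []) :
    pvOcc sub l r ↔ r + sub.length ≤ l.length ∧ ∀ j, j < sub.length → pvAt l (r + j) = pvAt sub j := by
  have hpos : 0 < sub.length := List.length_pos_of_ne_nil hsub
  unfold pvOcc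
  rw [pvPrefix_iff]
  simp only [List.length_drop]
  constructor
  · rintro ⟨h1, h2⟩
    refine ⟨by omega, fun j hj => ?_⟩
    have := h2 j hj; rwa [pvAt_drop] at this
  · rintro ⟨h1, h2⟩
    refine ⟨by omega, fun j hj => ?_⟩
    rw [pvAt_drop]; exact h2 j hj

theorem pvOcc_length {sub l : List Char} {r : Nat} (hsub : sub ≠ []) (h : pvOcc sub l r) :
    r + sub.length ≤ l.length := ((pvOcc_iff hsub).mp h).1

theorem pvOcc_drop_iff {sub l : List Char} {k r : Nat} :
    pvOcc sub (l.drop k) r ↔ pvOcc sub l (k + r) := by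
  unfold pvOcc
  rw [List.drop_drop]


-- ---------- charwise lowering relation and transfer of occurrences/finds ----------
-- i is l with some characters lowered
def pvRel (i l : List Char) : Prop :=
  i.length = l.length ∧ ∀ q : Nat, pvAt i q = pvAt l q ∨ pvAt i q = PySem.Chars.lowerChar (pvAt l q)

theorem pvAt_mem {l : List Char} {j : Nat} (h : j < l.length) : pvAt l j ∈ l := by
  rw [pvAt_eq_getD, List.getElem?_eq_getElem h]
  exact List.getElem_mem h

theorem pvOcc_transfer {i l sub : List Char} (hrel : pvRel i l)
    (hsub : ∀ c ∈ sub, pvLetterFree c = true) (hne : sub ≠ []) (r : Nat) :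
    pvOcc sub i r ↔ pvOcc sub l r := by
  rw [pvOcc_iff hne, pvOcc_iff hne, hrel.1]
  constructor <;> rintro ⟨h1, h2⟩ <;> refine ⟨h1, fun j hj => ?_⟩ <;>
    have hd := hsub _ (pvAt_mem hj) <;> have := h2 j hj <;>
    rcases hrel.2 (r + j) with hq | hq
  · rwa [hq] at this
  · rw [hq] at this; exact (pvLch_eq_LF_iff hd).mp this
  · rw [hq]; exact this
  · rw [hq]; exact (pvLch_eq_LF_iff hd).mpr this

theorem pvFindFrom_lt_zero_eq {m sub : List Char} {k : Nat} (hk : k ≤ m.length)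
    (h : PySem.Chars.findFrom m sub (k : Int) < 0) : PySem.Chars.findFrom m sub (k : Int) = -1 := by
  by_cases he : PySem.Chars.findFrom m sub (k : Int) = -1
  · exact he
  · have spec := PySem.Chars.findFrom_natCast_spec m sub k hk he
    omega

theorem pvFindFrom_neg {m sub : List Char} {k : Nat} (hk : k ≤ m.length)
    (h : PySem.Chars.findFrom m sub (k : Int) < 0) : ∀ j, k ≤ j → ¬ pvOcc sub m j := by
  have he := pvFindFrom_lt_zero_eq hk h
  rw [PySem.Chars.findFrom_natCast_eq_neg_one_iff m sub k hk] at he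
  intro j hj hocc
  apply he
  have : sub <+: (m.drop k).drop (j - k) := by
    rw [List.drop_drop]
    have : k + (j - k) = j := by omega
    rw [this]
    exact hocc
  exact this.isInfix.trans (List.drop_suffix _ _).isInfix

theorem pvFindFrom_pos {m sub : List Char} {k : Nat} (hk : k ≤ m.length)
    (h : ¬ PySem.Chars.findFrom m sub (k : Int) < 0) :
    ∃ s : Nat, PySem.Chars.findFrom m sub (k : Int) = (s : Int) ∧ k ≤ s ∧ pvOcc sub m s ∧
      ∀ j, k ≤ j → j < s → ¬ pvOcc sub m j := by
  have hne : PySem.Chars.findFrom m sub (k : Int) ≠ -1 := by omega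
  have spec := PySem.Chars.findFrom_natCast_spec m sub k hk hne
  refine ⟨(PySem.Chars.findFrom m sub (k : Int)).toNat, (Int.toNat_of_nonneg (by omega)).symm, ?_, spec.2.1, spec.2.2⟩
  have := spec.1
  omega


-- ---------- more access helpers ----------
theorem pvAt_cons_zero (c : Char) (t : List Char) : pvAt (c :: t) 0 = c := rfl

theorem pvAt_cons_succ (c : Char) (t : List Char) (q : Nat) : pvAt (c :: t) (q+1) = pvAt t q := rfl

theorem pvAt_eq_getElem {l : List Char} {q : Nat} (h : q < l.length) : pvAt l q = l[q] := by
  rw [pvAt_eq_getD, List.getElem?_eq_getElem h]; rfl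

theorem pvOcc_cons_succ {old : List Char} {c : Char} {t : List Char} {r : Nat} :
    pvOcc old (c :: t) (r+1) ↔ pvOcc old t r := by
  unfold pvOcc; rw [List.drop_succ_cons]

theorem pvOcc_zero_at {old l : List Char} (hold : old ≠ []) (h : pvOcc old l 0) :
    ∀ j, j < old.length → pvAt l j = pvAt old j := by
  intro j hj
  have := ((pvOcc_iff hold).mp h).2 j hj
  simpa using this

theorem pvOcc_take_iff {old l : List Char} {k r : Nat} (hold : old ≠ [])
    (hk : r + old.length ≤ k) : pvOcc old (l.take k) r ↔ pvOcc old l r := by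
  rw [pvOcc_iff hold, pvOcc_iff hold]
  constructor <;> rintro ⟨h1, h2⟩
  · refine ⟨by simp at h1; omega, fun j hj => ?_⟩
    have := h2 j hj
    rwa [pvAt_take (by omega : r + j < k)] at this
  · refine ⟨by simp; omega, fun j hj => ?_⟩
    rw [pvAt_take (by omega : r + j < k)]
    exact h2 j hj

theorem pvPrefix_of_take {old l : List Char} {k : Nat} (h : old <+: l.take k) : old <+: l :=
  h.trans (List.take_prefix k l)

-- ---------- PySem.Chars.replace is the greedy rewrite pvGrep ----------
theorem pvGo_zero (old new l acc : List Char) :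
    PySem.Chars.replace.go old new 0 l acc = acc.reverse ++ l := by
  cases l <;> rw [PySem.Chars.replace.go]

theorem pvGo_nil (old new acc : List Char) (fuel : Nat) :
    PySem.Chars.replace.go old new fuel [] acc = acc.reverse := by
  cases fuel <;> rw [PySem.Chars.replace.go] <;> simp

theorem pvGo_cons (old new : List Char) (c : Char) (t acc : List Char) (fuel : Nat) :
    PySem.Chars.replace.go old new (fuel+1) (c :: t) acc =
    (if old.isPrefixOf (c :: t) then PySem.Chars.replace.go old new fuel ((c::t).drop old.length) (new.reverse ++ acc)
     else PySem.Chars.replace.go old new fuel t (c :: acc)) := by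
  rw [PySem.Chars.replace.go]

theorem pvGo_eq_grep {old new : List Char} (hold : old ≠ []) :
    ∀ fuel l acc, l.length ≤ fuel →
      PySem.Chars.replace.go old new fuel l acc = acc.reverse ++ pvGrep old new l := by
  have holdlen : 1 ≤ old.length := List.length_pos_of_ne_nil hold
  intro fuel
  induction fuel with
  | zero =>
    intro l acc hl
    have : l = [] := List.eq_nil_of_length_eq_zero (by omega)
    subst this
    rw [pvGo_zero, pvGrep]
  | succ n ih =>
    intro l acc hl
    match l with
    | [] =>
      rw [pvGo_nil, pvGrep]
      simp
    | c :: t =>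
      rw [pvGo_cons]
      by_cases hp : old.isPrefixOf (c :: t)
      · rw [if_pos hp, pvGrep, dif_pos ⟨hold, hp⟩]
        rw [ih _ _ (by simp at hl ⊢; omega)]
        simp
      · rw [if_neg hp, pvGrep, dif_neg (by simp [hp])]
        rw [ih _ _ (by simp at hl ⊢; omega)]
        simp

theorem pvReplace_eq_grep {old : List Char} (hold : old ≠ []) (s new : List Char) :
    PySem.Chars.replace s old new = pvGrep old new s := by
  unfold PySem.Chars.replace
  rw [if_neg (by simp [hold]), pvGo_eq_grep hold s.length s [] le_rfl]
  simp

theorem pvReplace_nil_nil (s : List Char) : PySem.Chars.replace s [] [] = s := by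
  unfold PySem.Chars.replace
  simp

-- ---------- pvGrep lemmas ----------
theorem pvGrep_len {old new : List Char} (hold : old ≠ []) (hlen : new.length = old.length) :
    ∀ l, (pvGrep old new l).length = l.length := by
  have holdlen : 1 ≤ old.length := List.length_pos_of_ne_nil hold
  suffices h : ∀ n l, l.length ≤ n → (pvGrep old new l).length = l.length from
    fun l => h l.length l le_rfl
  intro n
  induction n with
  | zero =>
    intro l hl
    have : l = [] := List.eq_nil_of_length_eq_zero (by omega)
    subst this; rw [pvGrep]
  | succ n ih =>
    intro l hl
    match l with
    | [] => rw [pvGrep]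
    | c :: t =>
      rw [pvGrep]
      by_cases hp : old.isPrefixOf (c :: t)
      · rw [dif_pos ⟨hold, hp⟩]
        have hlold : old.length ≤ t.length + 1 := by
          have := (List.isPrefixOf_iff_prefix.mp hp).length_le; simpa using this
        rw [List.length_append, hlen, ih _ (by simp at hl ⊢; omega)]
        simp; omega
      · rw [dif_neg (by simp [hp])]
        simp [ih _ (by simp at hl ⊢; omega)]

theorem pvGrep_point {old : List Char} (hold : old ≠ []) :
    ∀ l q, q < l.length →
      pvAt (pvGrep old (PySem.Chars.lower old) l) q = pvAt l q ∨
      (pvAt (pvGrep old (PySem.Chars.lower old) l) q = PySem.Chars.lowerChar (pvAt l q) ∧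
        ∃ r, r ≤ q ∧ q < r + old.length ∧ pvOcc old l r) := by
  have holdlen : 1 ≤ old.length := List.length_pos_of_ne_nil hold
  suffices h : ∀ n l, l.length ≤ n → ∀ q, q < l.length →
      pvAt (pvGrep old (PySem.Chars.lower old) l) q = pvAt l q ∨
      (pvAt (pvGrep old (PySem.Chars.lower old) l) q = PySem.Chars.lowerChar (pvAt l q) ∧
        ∃ r, r ≤ q ∧ q < r + old.length ∧ pvOcc old l r) from
    fun l => h l.length l le_rfl
  intro n
  induction n with
  | zero =>
    intro l hl q hq; omega
  | succ n ih =>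
    intro l hl q hq
    match l with
    | [] => simp at hq
    | c :: t =>
      rw [pvGrep]
      by_cases hp : old.isPrefixOf (c :: t)
      · rw [dif_pos ⟨hold, hp⟩]
        have hocc0 : pvOcc old (c :: t) 0 := List.isPrefixOf_iff_prefix.mp hp
        have hlold : old.length ≤ t.length + 1 := by
          have := (List.isPrefixOf_iff_prefix.mp hp).length_le; simpa using this
        by_cases hqo : q < old.length
        · right
          constructor
          · rw [pvAt_append_left (by simp [PySem.Chars.lower]; omega),
              PySem.Chars.lower, pvAt_map hqo, pvOcc_zero_at hold hocc0 q hqo]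
          · exact ⟨0, by omega, by omega, hocc0⟩
        · obtain ⟨q', rfl⟩ : ∃ q', q = old.length + q' := ⟨q - old.length, by omega⟩
          have hlenlow : (PySem.Chars.lower old).length = old.length := by
            simp [PySem.Chars.lower]
          have hsplit : pvAt (PySem.Chars.lower old ++ pvGrep old (PySem.Chars.lower old) ((c :: t).drop old.length)) (old.length + q')
              = pvAt (pvGrep old (PySem.Chars.lower old) ((c :: t).drop old.length)) q' := by
            have h := pvAt_append_right (PySem.Chars.lower old) (pvGrep old (PySem.Chars.lower old) ((c :: t).drop old.length)) q'
            rw [hlenlow] at h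
            exact h
          rw [hsplit]
          have hrec := ih ((c :: t).drop old.length) (by simp at hl ⊢; omega) q'
            (by simp at hq ⊢; omega)
          have hdropAt : ∀ x : Nat, pvAt ((c :: t).drop old.length) x = pvAt (c :: t) (old.length + x) :=
            fun x => pvAt_drop (c :: t) old.length x
          rcases hrec with h1 | ⟨h1, r, hr1, hr2, hr3⟩
          · left
            rw [h1, hdropAt]
          · right
            constructor
            · rw [h1, hdropAt]
            · refine ⟨old.length + r, by omega, by omega, ?_⟩
              rwa [← pvOcc_drop_iff]
      · rw [dif_neg (by simp [hp])]
        match q with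
        | 0 => left; rw [pvAt_cons_zero, pvAt_cons_zero]
        | q+1 =>
          have hrec := ih t (by simp at hl ⊢; omega) q (by simp at hq ⊢; omega)
          rw [pvAt_cons_succ, pvAt_cons_succ]
          rcases hrec with h1 | ⟨h1, r, hr1, hr2, hr3⟩
          · exact Or.inl h1
          · exact Or.inr ⟨h1, r+1, by omega, by omega, pvOcc_cons_succ.mpr hr3⟩

theorem pvGrep_fixed {old : List Char} (hold : old ≠ []) :
    ∀ l, (∀ r, pvOcc old l r → ∀ j, j < old.length →
        PySem.Chars.lowerChar (pvAt l (r+j)) = pvAt l (r+j)) →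
      pvGrep old (PySem.Chars.lower old) l = l := by
  have holdlen : 1 ≤ old.length := List.length_pos_of_ne_nil hold
  suffices h : ∀ n l, l.length ≤ n → (∀ r, pvOcc old l r → ∀ j, j < old.length →
      PySem.Chars.lowerChar (pvAt l (r+j)) = pvAt l (r+j)) →
      pvGrep old (PySem.Chars.lower old) l = l from
    fun l => h l.length l le_rfl
  intro n
  induction n with
  | zero =>
    intro l hl _
    have : l = [] := List.eq_nil_of_length_eq_zero (by omega)
    subst this; rw [pvGrep]
  | succ n ih =>
    intro l hl hfix
    match l with
    | [] => rw [pvGrep]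
    | c :: t =>
      rw [pvGrep]
      by_cases hp : old.isPrefixOf (c :: t)
      · rw [dif_pos ⟨hold, hp⟩]
        have hocc0 : pvOcc old (c :: t) 0 := List.isPrefixOf_iff_prefix.mp hp
        have hlow : PySem.Chars.lower old = old := by
          apply List.ext_getElem (by simp [PySem.Chars.lower])
          intro j hj1 hj2
          have hj : j < old.length := hj2
          have e1 : (PySem.Chars.lower old)[j] = PySem.Chars.lowerChar old[j] := by
            simp [PySem.Chars.lower]
          rw [e1]
          have e2 := pvOcc_zero_at hold hocc0 j hj
          have e3 := hfix 0 hocc0 j hj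
          simp only [Nat.zero_add] at e3
          rw [e2] at e3
          rw [← pvAt_eq_getElem hj, e3]
        have hrec := ih ((c :: t).drop old.length) (by simp at hl ⊢; omega) ?hfix'
        · rw [hrec, hlow]
          conv_rhs => rw [← List.take_append_drop old.length (c :: t)]
          congr 1
          exact List.prefix_iff_eq_take.mp (List.isPrefixOf_iff_prefix.mp hp)
        · case hfix' =>
          intro r hocc j hj
          rw [pvOcc_drop_iff] at hocc
          rw [pvAt_drop, ← Nat.add_assoc]
          exact hfix (old.length + r) hocc j hj
      · rw [dif_neg (by simp [hp])]
        congr 1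
        apply ih _ (by simp at hl ⊢; omega)
        intro r hocc j hj
        have := hfix (r+1) (pvOcc_cons_succ.mpr hocc) j hj
        rw [show r + 1 + j = (r + j) + 1 by omega, pvAt_cons_succ] at this
        exact this

theorem pvGrep_split {old new : List Char} (hold : old ≠ []) :
    ∀ l k, (∀ r, r < k → pvOcc old l r → r + old.length ≤ k) →
      pvGrep old new l = pvGrep old new (l.take k) ++ pvGrep old new (l.drop k) := by
  have holdlen : 1 ≤ old.length := List.length_pos_of_ne_nil hold
  suffices h : ∀ n l, l.length ≤ n → ∀ k, (∀ r, r < k → pvOcc old l r → r + old.length ≤ k) →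
      pvGrep old new l = pvGrep old new (l.take k) ++ pvGrep old new (l.drop k) from
    fun l => h l.length l le_rfl
  intro n
  induction n with
  | zero =>
    intro l hl k _
    have : l = [] := List.eq_nil_of_length_eq_zero (by omega)
    subst this
    simp only [List.take_nil, List.drop_nil]
    rw [pvGrep]
    simp
  | succ n ih =>
    intro l hl k hk
    match l with
    | [] =>
      simp only [List.take_nil, List.drop_nil]
      rw [pvGrep]
      simp
    | c :: t =>
      match k with
      | 0 => simp [pvGrep]
      | k+1 =>
        rw [pvGrep]
        by_cases hp : old.isPrefixOf (c :: t)
        · rw [dif_pos ⟨hold, hp⟩]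
          have hocc0 : pvOcc old (c :: t) 0 := List.isPrefixOf_iff_prefix.mp hp
          have hko : old.length ≤ k+1 := by
            have := hk 0 (by omega) hocc0; omega
          have hlold : old.length ≤ t.length + 1 := by
            have := (List.isPrefixOf_iff_prefix.mp hp).length_le; simpa using this
          have htk : (c :: t).take (k+1) = c :: t.take k := List.take_succ_cons
          have hocc0' : pvOcc old ((c :: t).take (k+1)) 0 :=
            (pvOcc_take_iff hold (by omega)).mpr hocc0
          have hp' : old.isPrefixOf (c :: t.take k) := by
            rw [← htk]; exact List.isPrefixOf_iff_prefix.mpr hocc0'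
          rw [htk]
          conv_rhs => rw [pvGrep]
          rw [dif_pos ⟨hold, hp'⟩]
          rw [ih ((c :: t).drop old.length) (by simp at hl ⊢; omega) (k+1-old.length) ?hshift]
          · have e1 : (c :: t.take k).drop old.length = ((c :: t).drop old.length).take (k+1-old.length) := by
              rw [← htk, List.drop_take]
            have e2 : (c :: t).drop (k+1) = ((c :: t).drop old.length).drop (k+1-old.length) := by
              rw [List.drop_drop]; congr 1; omega
            rw [e1, e2, List.append_assoc]
          · case hshift =>
            intro r hr hocc
            rw [pvOcc_drop_iff] at hocc
            have := hk (old.length + r) (by omega) hocc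
            omega
        · rw [dif_neg (by simp [hp])]
          have htk : (c :: t).take (k+1) = c :: t.take k := by simp
          have hp' : ¬ old.isPrefixOf (c :: t.take k) := by
            intro hx
            apply hp
            rw [List.isPrefixOf_iff_prefix] at hx ⊢
            rw [← htk] at hx
            exact pvPrefix_of_take hx
          conv_rhs => rw [htk, pvGrep]
          rw [dif_neg (by simp [hp'])]
          have hdk : (c :: t).drop (k+1) = t.drop k := by simp
          rw [hdk, List.cons_append]
          congr 1
          apply ih t (by simp at hl ⊢; omega) k
          intro r hr hocc
          have := hk (r+1) (by omega) (pvOcc_cons_succ.mpr hocc)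
          omega

theorem pvGrep_head {old new l : List Char} (hold : old ≠ []) (h : pvOcc old l 0) :
    pvGrep old new l = new ++ pvGrep old new (l.drop old.length) := by
  have hp : old.isPrefixOf l := List.isPrefixOf_iff_prefix.mpr h
  match l, h with
  | [], hx => exact absurd (List.prefix_iff_eq_take.mp hx) (by simpa using hold)
  | c :: t, hx =>
    rw [pvGrep, dif_pos ⟨hold, hp⟩]


-- ---------- three-part append indexing ----------
theorem pvAt3_lo {A B C : List Char} {q : Nat} (h : q < A.length) :
    pvAt (A ++ B ++ C) q = pvAt A q := by
  rw [pvAt_append_left (by simp; omega), pvAt_append_left h]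

theorem pvAt3_mid {A B C : List Char} {q : Nat} (h1 : A.length ≤ q) (h2 : q < A.length + B.length) :
    pvAt (A ++ B ++ C) q = pvAt B (q - A.length) := by
  rw [pvAt_append_left (by simp; omega)]
  obtain ⟨x, rfl⟩ : ∃ x, q = A.length + x := ⟨q - A.length, by omega⟩
  rw [pvAt_append_right]
  congr 1; omega

theorem pvAt3_hi {A B C : List Char} {q : Nat} (h : A.length + B.length ≤ q) :
    pvAt (A ++ B ++ C) q = pvAt C (q - A.length - B.length) := by
  rw [List.append_assoc]
  obtain ⟨x, rfl⟩ : ∃ x, q = A.length + (B.length + x) := ⟨q - A.length - B.length, by omega⟩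
  rw [pvAt_append_right, pvAt_append_right]
  congr 1; omega

-- occurrences of a one-character pattern
theorem pvOccC0_iff {m : List Char} {c0 : Char} {y : Nat} :
    pvOcc [c0] m y ↔ y < m.length ∧ pvAt m y = c0 := by
  rw [pvOcc_iff (by simp)]
  simp only [List.length_cons, List.length_nil]
  constructor
  · rintro ⟨h1, h2⟩
    have := h2 0 (by omega)
    simp [pvAt_cons_zero] at this
    exact ⟨by omega, this⟩
  · rintro ⟨h1, h2⟩
    refine ⟨by omega, fun j hj => ?_⟩
    have : j = 0 := by omega
    subst this
    simpa [pvAt_cons_zero] using h2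

theorem pvOcc_head {sub m : List Char} {r : Nat} (hsub : sub ≠ []) (h : pvOcc sub m r) :
    pvAt m r = pvAt sub 0 := by
  have := ((pvOcc_iff hsub).mp h).2 0 (List.length_pos_of_ne_nil hsub)
  simpa using this

theorem pvC0_prefix_iff {ss : List Char} {c0 : Char} (hss : ss ≠ []) :
    [c0] <+: ss ↔ pvAt ss 0 = c0 := by
  rw [pvPrefix_iff]
  simp only [List.length_cons, List.length_nil]
  constructor
  · rintro ⟨_, h2⟩
    have := h2 0 (by omega)
    simpa [pvAt_cons_zero] using this
  · intro h
    refine ⟨by have := List.length_pos_of_ne_nil hss; omega, fun j hj => ?_⟩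
    have : j = 0 := by omega
    subst this
    simpa [pvAt_cons_zero] using h

-- ---------- pvBlow basic shape ----------
theorem pvBlow_nil (ss ts : List Char) : pvBlow ss ts [] = [] := by
  rw [pvBlow]; simp

theorem pvBlow_stop {ss ts rest : List Char}
    (h : PySem.Chars.find rest ss < 0 ∨ (¬ PySem.Chars.find rest ss < 0 ∧ PySem.Chars.findFrom rest ts (PySem.Chars.find rest ss) < 0)) :
    pvBlow ss ts rest = rest := by
  rw [pvBlow]
  by_cases hz : rest.length = 0
  · rw [dif_pos hz]
  · rw [dif_neg hz]
    rcases h with h | ⟨h1, h2⟩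
    · rw [dif_pos h]
    · rw [dif_neg h1, dif_pos h2]

theorem pvBlow_step {ss ts rest : List Char} {sn tn : Nat}
    (hlen : rest.length ≠ 0)
    (hs : PySem.Chars.find rest ss = (sn : Int))
    (ht : PySem.Chars.findFrom rest ts (sn : Int) = (tn : Int)) :
    pvBlow ss ts rest =
      rest.take sn ++ (((rest.drop sn).take (tn + 1 - sn)).map PySem.Chars.lowerChar)
        ++ pvBlow ss ts (rest.drop (tn + 1)) := by
  rw [pvBlow]
  rw [dif_neg hlen]
  have h1 : ¬ PySem.Chars.find rest ss < 0 := by rw [hs]; omega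
  rw [dif_neg h1]
  have hsrw : PySem.Chars.find rest ss = (sn : Int) := hs
  have h2 : ¬ PySem.Chars.findFrom rest ts (PySem.Chars.find rest ss) < 0 := by
    rw [hsrw, ht]; omega
  rw [dif_neg h2]
  rw [hsrw, ht]
  have e1 : ((sn : Int)).toNat = sn := by omega
  have e2 : ((tn : Int)).toNat = tn := by omega
  rw [e1, e2]
  rfl

-- every character of pvBlow is the original or its lowering
theorem pvBlow_at {ss ts : List Char} (hts : ts ≠ []) :
    ∀ rest (q : Nat), pvAt (pvBlow ss ts rest) q = pvAt rest q ∨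
      pvAt (pvBlow ss ts rest) q = PySem.Chars.lowerChar (pvAt rest q) := by
  suffices h : ∀ n rest, rest.length ≤ n → ∀ q : Nat, pvAt (pvBlow ss ts rest) q = pvAt rest q ∨
      pvAt (pvBlow ss ts rest) q = PySem.Chars.lowerChar (pvAt rest q) from
    fun rest => h rest.length rest le_rfl
  intro n
  induction n with
  | zero =>
    intro rest hl q
    have : rest = [] := List.eq_nil_of_length_eq_zero (by omega)
    subst this; rw [pvBlow_nil]; exact Or.inl rfl
  | succ n ih =>
    intro rest hl q
    by_cases hz : rest.length = 0
    · have : rest = [] := List.eq_nil_of_length_eq_zero hz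
      subst this; rw [pvBlow_nil]; exact Or.inl rfl
    by_cases hs : PySem.Chars.find rest ss < 0
    · rw [pvBlow_stop (Or.inl hs)]; exact Or.inl rfl
    have hpos := pvFindFrom_pos (m := rest) (sub := ss) (k := 0) (by omega)
      (by rw [Nat.cast_zero, PySem.Chars.findFrom_zero]; exact hs)
    obtain ⟨sn, hsn, _, hoccs, _⟩ := hpos
    rw [Nat.cast_zero, PySem.Chars.findFrom_zero] at hsn
    have hsn_le : sn ≤ rest.length := by
      have h1 := PySem.Chars.find_le_length rest ss
      rw [hsn] at h1; omega
    by_cases ht : PySem.Chars.findFrom rest ts (sn : Int) < 0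
    · rw [pvBlow_stop (Or.inr ⟨by rw [hsn]; omega, by rw [hsn]; exact ht⟩)]; exact Or.inl rfl
    obtain ⟨tn, htn, htn1, hocct, htmin⟩ := pvFindFrom_pos (k := sn) hsn_le ht
    have htn_lt : tn < rest.length := by
      have := pvOcc_length hts hocct
      have := List.length_pos_of_ne_nil hts
      omega
    rw [pvBlow_step hz hsn htn]
    set A := rest.take sn with hA
    set B := ((rest.drop sn).take (tn + 1 - sn)).map PySem.Chars.lowerChar with hB
    have hAlen : A.length = sn := by simp [hA]; omega
    have hBlen : B.length = tn + 1 - sn := by simp [hB]; omega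
    by_cases hq1 : q < sn
    · rw [pvAt3_lo (by omega)]
      rw [hA, pvAt_take hq1]
      exact Or.inl rfl
    by_cases hq2 : q ≤ tn
    · rw [pvAt3_mid (by omega) (by omega)]
      right
      rw [hA, hAlen, hB, pvAt_map (by simp; omega), pvAt_take (by omega), pvAt_drop]
      congr 2
      omega
    · rw [pvAt3_hi (by omega)]
      have hrec := ih (rest.drop (tn+1)) (by simp; omega) (q - A.length - B.length)
      rcases hrec with h1 | h1 <;> rw [h1, pvAt_drop] <;>
        [left; right] <;> congr 2 <;> omega


-- ---------- COVER: every properly closed anchor region is lowered by the scan ----------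
theorem pvCover {ss : List Char} {c0 : Char} (hss : ss ≠ []) :
    ∀ rest (r e : Nat), pvOcc ss rest r → e < rest.length → pvAt rest e = c0 → r ≤ e →
      (∀ y, r ≤ y → y < e → pvAt rest y ≠ c0) →
      ∀ x, r ≤ x → x ≤ e → pvAt (pvBlow ss [c0] rest) x = PySem.Chars.lowerChar (pvAt rest x) := by
  suffices h : ∀ n rest, rest.length ≤ n → ∀ (r e : Nat), pvOcc ss rest r → e < rest.length → pvAt rest e = c0 → r ≤ e →
      (∀ y, r ≤ y → y < e → pvAt rest y ≠ c0) →
      ∀ x, r ≤ x → x ≤ e → pvAt (pvBlow ss [c0] rest) x = PySem.Chars.lowerChar (pvAt rest x) from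
    fun rest => h rest.length rest le_rfl
  intro n
  induction n with
  | zero =>
    intro rest hl r e _ he _ _ _ _ _ _; omega
  | succ n ih =>
    intro rest hl r e hoccr he hc0e hre hnoc0 x hrx hxe
    have hz : ¬ rest.length = 0 := by omega
    have hs : ¬ PySem.Chars.find rest ss < 0 := by
      intro hneg
      have h0 : PySem.Chars.findFrom rest ss ((0:Nat) : Int) < 0 := by
        rw [Nat.cast_zero, PySem.Chars.findFrom_zero]; exact hneg
      exact pvFindFrom_neg (by omega) h0 r (by omega) hoccr
    have hpos := pvFindFrom_pos (m := rest) (sub := ss) (k := 0) (by omega)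
      (by rw [Nat.cast_zero, PySem.Chars.findFrom_zero]; exact hs)
    obtain ⟨sn, hsn, _, hoccs, hsmin⟩ := hpos
    rw [Nat.cast_zero, PySem.Chars.findFrom_zero] at hsn
    have hsn_le : sn ≤ rest.length := by
      have h1 := PySem.Chars.find_le_length rest ss
      rw [hsn] at h1; omega
    have hsr : sn ≤ r := by
      by_contra hcon
      exact hsmin r (by omega) (by omega) hoccr
    have hocce : pvOcc [c0] rest e := pvOccC0_iff.mpr ⟨he, hc0e⟩
    have ht : ¬ PySem.Chars.findFrom rest [c0] (sn : Int) < 0 := by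
      intro hneg
      exact pvFindFrom_neg hsn_le hneg e (by omega) hocce
    obtain ⟨tn, htn, htn1, hocct, htmin⟩ := pvFindFrom_pos (k := sn) hsn_le ht
    have htn_lt : tn < rest.length := (pvOccC0_iff.mp hocct).1
    have hc0tn : pvAt rest tn = c0 := (pvOccC0_iff.mp hocct).2
    rw [pvBlow_step hz hsn htn]
    set A := rest.take sn with hA
    set B := ((rest.drop sn).take (tn + 1 - sn)).map PySem.Chars.lowerChar with hB
    have hAlen : A.length = sn := by simp [hA]; omega
    by_cases hcase : r ≤ tn
    · -- then tn = e and the whole region sits inside the current span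
      have htne : tn = e := by
        have h1 : ¬ (r ≤ tn ∧ tn < e) := fun ⟨ha, hb⟩ => hnoc0 tn ha hb hc0tn
        have h2 : ¬ e < tn := fun hlt => htmin e (by omega) hlt hocce
        omega
      have hBlen : B.length = tn + 1 - sn := by simp [hB]; omega
      rw [pvAt3_mid (by omega) (by omega)]
      rw [hB, hAlen, pvAt_map (by simp; omega), pvAt_take (by omega), pvAt_drop]
      congr 2
      omega
    · -- the current span ends before r: recurse on the remaining suffix
      push_neg at hcase
      have hBlen : B.length = tn + 1 - sn := by simp [hB]; omega
      rw [pvAt3_hi (by omega)]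
      rw [hAlen, hBlen]
      have hx' : x - sn - (tn + 1 - sn) = x - (tn + 1) := by omega
      rw [hx']
      have hrec := ih (rest.drop (tn+1)) (by simp; omega) (r - (tn+1)) (e - (tn+1))
        (by rw [pvOcc_drop_iff]; have : tn + 1 + (r - (tn+1)) = r := by omega
            rwa [this])
        (by simp; omega)
        (by rw [pvAt_drop]; have : tn + 1 + (e - (tn+1)) = e := by omega
            rwa [this])
        (by omega)
        (by intro y hy1 hy2
            rw [pvAt_drop]
            exact hnoc0 (tn + 1 + y) (by omega) (by omega))
        (x - (tn+1)) (by omega) (by omega)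
      rw [hrec, pvAt_drop]
      congr 2
      omega

-- ---------- pvBLoop computes pvBlow ----------
theorem pvJoin_nil_flatten (parts : List (List Char)) : PySem.Chars.join [] parts = parts.flatten := by
  unfold PySem.Chars.join
  induction parts with
  | nil => simp [List.intercalate]
  | cons a t ih =>
    cases t with
    | nil => simp [List.intercalate]
    | cons b t2 =>
      simp [List.intercalate, List.intersperse] at ih ⊢
      exact ih

theorem pvBLoop_flatten {ss ts : List Char} (hss : ss ≠ []) :
    ∀ fuel rest chunks, rest.length < fuel →
      (pvBLoop ss ts fuel rest chunks).flatten = chunks.flatten ++ pvBlow ss ts rest := by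
  intro fuel
  induction fuel with
  | zero => intro rest chunks h; omega
  | succ n ih =>
    intro rest chunks h
    rw [pvBLoop]
    by_cases hs : PySem.Chars.find rest ss < 0
    · rw [if_pos hs, pvBlow_stop (Or.inl hs)]
      simp
    rw [if_neg hs]
    have hpos := pvFindFrom_pos (m := rest) (sub := ss) (k := 0) (by omega)
      (by rw [Nat.cast_zero, PySem.Chars.findFrom_zero]; exact hs)
    obtain ⟨sn, hsn, _, hoccs, _⟩ := hpos
    rw [Nat.cast_zero, PySem.Chars.findFrom_zero] at hsn
    have hsn_le : sn ≤ rest.length := by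
      have h1 := PySem.Chars.find_le_length rest ss
      rw [hsn] at h1; omega
    by_cases ht : PySem.Chars.findFrom rest ts (PySem.Chars.find rest ss) < 0
    · rw [if_pos ht, pvBlow_stop (Or.inr ⟨hs, ht⟩)]
      simp
    rw [if_neg ht]
    rw [hsn] at ht
    obtain ⟨tn, htn, htn1, hocct, _⟩ := pvFindFrom_pos (k := sn) hsn_le ht
    have hz : ¬ rest.length = 0 := by
      intro hz
      have : rest = [] := List.eq_nil_of_length_eq_zero hz
      subst this
      simp [pvOcc] at hoccs
      exact hss hoccs
    -- normalise the slices
    have hslice1 : PySem.Chars.slice rest none (some (PySem.Chars.find rest ss)) = rest.take sn := by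
      rw [PySem.Chars.slice_eq_listSlice, hsn, PySem.List.slice_to _ (by omega)]
      have f1 : ((sn : Int)).toNat = sn := by omega
      rw [f1]
    have hslice2 : PySem.Chars.slice rest (some (PySem.Chars.find rest ss))
        (some (PySem.Chars.findFrom rest ts (PySem.Chars.find rest ss) + 1)) = (rest.drop sn).take (tn + 1 - sn) := by
      rw [PySem.Chars.slice_eq_listSlice, hsn, htn, PySem.List.slice_toNat _ (by omega) (by omega)]
      have f1 : ((sn : Int)).toNat = sn := by omega
      have f2 : ((tn : Int) + 1).toNat = tn + 1 := by omega
      rw [f1, f2]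
    have hslice3 : PySem.Chars.slice rest (some (PySem.Chars.findFrom rest ts (PySem.Chars.find rest ss) + 1)) none = rest.drop (tn + 1) := by
      rw [PySem.Chars.slice_eq_listSlice, hsn, htn, PySem.List.slice_from _ (by omega)]
      have f2 : ((tn : Int) + 1).toNat = tn + 1 := by omega
      rw [f2]
    rw [hslice1, hslice2, hslice3]
    rw [ih (rest.drop (tn+1)) _ (by simp; omega)]
    rw [pvBlow_step hz hsn htn]
    simp [PySem.Chars.lower]

-- ---------- pvALoop helpers ----------
theorem pvALoop_neg {ss ts : List Char} {st : Int} (h : st < 0) :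
    ∀ fuel i, pvALoop ss ts fuel i st = i := by
  intro fuel i
  cases fuel with
  | zero => rfl
  | succ n => rw [pvALoop, if_pos h]


-- ---------- small glue lemmas for the main induction ----------
theorem pvExt {a b : List Char} (hlen : a.length = b.length)
    (h : ∀ q, q < a.length → pvAt a q = pvAt b q) : a = b := by
  apply List.ext_getElem hlen
  intro q h1 h2
  rw [← pvAt_eq_getElem h1, ← pvAt_eq_getElem h2]
  exact h q h1

theorem pvLF_forces_eq {a b : Char} (hLF : pvLetterFree a = true)
    (h : a = b ∨ a = PySem.Chars.lowerChar b) : a = b := by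
  rcases h with h | h
  · exact h
  · cases hu : PySem.Chars.isupper b
    · rw [h, pvLch_of_not_upper hu]
    · exfalso
      have h1 := pvLch_toNat_of_upper hu
      have h2 := pvUpper_iff.mp hu
      have h3 := pvLF_iff.mp hLF
      rw [h] at h3
      omega

theorem pvRelAt_c0 {a b c0 : Char} (hc0 : pvLetterFree c0 = true)
    (h : a = b ∨ a = PySem.Chars.lowerChar b) : (a = c0) ↔ (b = c0) := by
  rcases h with h | h
  · rw [h]
  · rw [h]; exact pvLch_eq_LF_iff hc0

theorem pvSuffixRel {ss : List Char} {c0 : Char} {i l : List Char} {o : Nat}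
    (hlen : i.length = l.length)
    (H4 : ∀ q, o ≤ q → q < l.length →
      pvAt i q = pvAt l q ∨ pvAt i q = pvAt (pvBlow ss [c0] (l.drop o)) (q - o)) :
    pvRel (i.drop o) (l.drop o) := by
  constructor
  · simp [hlen]
  · intro x
    by_cases hb : o + x < l.length
    · rw [pvAt_drop, pvAt_drop]
      rcases H4 (o + x) (by omega) hb with h | h
      · exact Or.inl h
      · have hx : o + x - o = x := by omega
        rw [hx] at h
        rcases pvBlow_at (by simp : ([c0] : List Char) ≠ []) (l.drop o) x with h2 | h2
        · rw [pvAt_drop] at h2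
          exact Or.inl (by rw [h, h2])
        · rw [pvAt_drop] at h2
          exact Or.inr (by rw [h, h2])
    · rw [pvAt_drop, pvAt_drop, pvAt_oob (by omega), pvAt_oob (by omega : l.length ≤ o + x)]
      exact Or.inl rfl

theorem pvALoop_succ (ss ts : List Char) (m : Nat) (i : List Char) (st : Int) (h : ¬ st < 0) :
    pvALoop ss ts (m+1) i st =
      (if PySem.Chars.findFrom i ss st < 0 then i
       else pvALoop ss ts m
         (PySem.Chars.replace i
           (PySem.Chars.slice i (some (PySem.Chars.findFrom i ss st)) (some (PySem.Chars.findFrom i ts (PySem.Chars.findFrom i ss st) + 1)))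
           (PySem.Chars.lower (PySem.Chars.slice i (some (PySem.Chars.findFrom i ss st)) (some (PySem.Chars.findFrom i ts (PySem.Chars.findFrom i ss st) + 1)))))
         (PySem.Chars.findFrom i ts (PySem.Chars.findFrom i ss st))) := by
  rw [pvALoop, if_neg h]

-- ---------- the main simulation lemma: A's loop computes B's scan ----------
theorem pvMain {ss : List Char} {c0 : Char} (hss : ss ≠ [])
    (hLFss : ∀ c ∈ ss, pvLetterFree c = true) (hLFc0 : pvLetterFree c0 = true)
    (hnp : ¬ [c0] <+: ss) (l : List Char) :
    ∀ fuel (i : List Char) (st : Int) (o : Nat),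
      i.length = l.length →
      l.length - o < fuel →
      ((st = 0 ∧ o = 0) ∨ (st = (o : Int) - 1 ∧ 1 ≤ o ∧ o ≤ l.length ∧ pvAt i (o-1) = c0)) →
      (∀ r x : Nat, (r : Int) < st → pvOcc ss i r → r ≤ x → x < l.length →
        (∀ y, r ≤ y → y < x → pvAt i y ≠ c0) →
        PySem.Chars.lowerChar (pvAt i x) = pvAt i x) →
      (∀ q, o ≤ q → q < l.length →
        pvAt i q = pvAt l q ∨ pvAt i q = pvAt (pvBlow ss [c0] (l.drop o)) (q - o)) →
      pvALoop ss [c0] fuel i st = i.take o ++ pvBlow ss [c0] (l.drop o) := by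
  have hc0ne : ([c0] : List Char) ≠ [] := by simp
  intro fuel
  induction fuel with
  | zero =>
    intro i st o _ hfuel _ _ _
    exact absurd hfuel (Nat.not_lt_zero _)
  | succ n' ih =>
    intro i st o hlen hfuel hb H2 H4
    have hss1 : 1 ≤ ss.length := List.length_pos_of_ne_nil hss
    have hst0 : 0 ≤ st := by rcases hb with ⟨h1, _⟩ | ⟨h1, h2, _, _⟩ <;> omega
    set k : Nat := st.toNat with hkdef
    have hstk : st = (k : Int) := by omega
    have hk_o : k ≤ o := by rcases hb with ⟨h1, h2⟩ | ⟨h1, h2, _, _⟩ <;> omega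
    have hk_le : k ≤ i.length := by
      rw [hlen]
      rcases hb with ⟨h1, h2⟩ | ⟨h1, h2, h3, _⟩ <;> omega
    have ho_le : o ≤ l.length := by
      rcases hb with ⟨_, h2⟩ | ⟨_, _, h3, _⟩ <;> omega
    have hrel : pvRel (i.drop o) (l.drop o) := pvSuffixRel hlen H4
    -- the two useful consequences of H4 + pvBlow_at
    have hIvsL : ∀ q, o ≤ q → q < l.length →
        pvAt i q = pvAt l q ∨ pvAt i q = PySem.Chars.lowerChar (pvAt l q) := by
      intro q hq1 hq2
      have h := hrel.2 (q - o)
      rw [pvAt_drop, pvAt_drop] at h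
      have e : o + (q - o) = q := by omega
      rw [e] at h
      exact h
    have hlch : ∀ q, o ≤ q → q < l.length →
        PySem.Chars.lowerChar (pvAt i q) = PySem.Chars.lowerChar (pvAt l q) := by
      intro q hq1 hq2
      rcases hIvsL q hq1 hq2 with h | h
      · rw [h]
      · rw [h, pvLch_idem]
    have hc0pos : ∀ q, o ≤ q → q < l.length → (pvAt i q = c0 ↔ pvAt l q = c0) :=
      fun q hq1 hq2 => pvRelAt_c0 hLFc0 (hIvsL q hq1 hq2)
    rw [pvALoop_succ _ _ _ _ _ (by omega)]
    rw [hstk]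
    by_cases hAs : PySem.Chars.findFrom i ss (k : Int) < 0
    · -- EXIT: no start symbol left anywhere
      rw [if_pos hAs]
      have hnoiocc : ∀ j, k ≤ j → ¬ pvOcc ss i j := pvFindFrom_neg hk_le hAs
      have hBstop : pvBlow ss [c0] (l.drop o) = l.drop o := by
        apply pvBlow_stop
        left
        by_contra hcon
        have hpos := pvFindFrom_pos (m := l.drop o) (sub := ss) (k := 0)
          (by omega) (by rw [Nat.cast_zero, PySem.Chars.findFrom_zero]; exact hcon)
        obtain ⟨x, _, _, hocc, _⟩ := hpos
        have : pvOcc ss (i.drop o) x := (pvOcc_transfer hrel hLFss hss x).mpr hocc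
        rw [pvOcc_drop_iff] at this
        exact hnoiocc (o + x) (by omega) this
      rw [hBstop]
      have hdropeq : i.drop o = l.drop o := by
        apply pvExt (by simp [hlen])
        intro q hq
        rw [pvAt_drop, pvAt_drop]
        have hql : o + q < l.length := by simp at hq; omega
        rcases H4 (o + q) (by omega) hql with h | h
        · exact h
        · rw [hBstop] at h
          rw [h, pvAt_drop]
          congr 1
          omega
      conv_lhs => rw [← List.take_append_drop o i]
      rw [hdropeq]
    · rw [if_neg hAs]
      obtain ⟨sn, hsni, hk_sn, hoccsn, hsmin⟩ := pvFindFrom_pos hk_le hAs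
      have hsn_lt : sn < i.length := by
        have := pvOcc_length hss hoccsn; omega
      have hsn_o : o ≤ sn := by
        rcases hb with ⟨h1, h2⟩ | ⟨h1, h2, h3, h4⟩
        · omega
        · -- k = o - 1 and there is no ss-occurrence at o-1 (its head there is c0)
          by_contra hcon
          have hsn_eq : sn = o - 1 := by omega
          have hhead := pvOcc_head hss hoccsn
          rw [hsn_eq, h4] at hhead
          exact hnp ((pvC0_prefix_iff hss).mpr hhead.symm)
      -- B-side first find
      have hBs : PySem.Chars.find (l.drop o) ss = ((sn - o : Nat) : Int) := by
        have hocc' : pvOcc ss (l.drop o) (sn - o) := by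
          apply (pvOcc_transfer hrel hLFss hss _).mp
          rw [pvOcc_drop_iff]
          have e : o + (sn - o) = sn := by omega
          rw [e]; exact hoccsn
        by_cases hneg : PySem.Chars.find (l.drop o) ss < 0
        · exfalso
          have h0 : PySem.Chars.findFrom (l.drop o) ss ((0:Nat) : Int) < 0 := by
            rw [Nat.cast_zero, PySem.Chars.findFrom_zero]; exact hneg
          exact pvFindFrom_neg (by omega) h0 (sn - o) (by omega) hocc'
        · have hpos := pvFindFrom_pos (m := l.drop o) (sub := ss) (k := 0)
            (by omega) (by rw [Nat.cast_zero, PySem.Chars.findFrom_zero]; exact hneg)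
          obtain ⟨x, hx, _, hoccx, hminx⟩ := hpos
          rw [Nat.cast_zero, PySem.Chars.findFrom_zero] at hx
          rw [hx]
          congr 1
          have hxi : pvOcc ss i (o + x) := by
            have := (pvOcc_transfer hrel hLFss hss x).mpr hoccx
            rwa [pvOcc_drop_iff] at this
          have h1 : ¬ x < sn - o := fun hlt => hsmin (o + x) (by omega) (by omega) hxi
          have h2 : ¬ sn - o < x := fun hlt => hminx (sn - o) (by omega) hlt hocc'
          omega
      rw [hsni]
      by_cases hAt : PySem.Chars.findFrom i [c0] ((sn : Nat) : Int) < 0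
      · -- EXIT: start symbol found but no stop symbol: replace is a no-op, next round stops
        have hAtm1 : PySem.Chars.findFrom i [c0] ((sn : Nat) : Int) = -1 :=
          pvFindFrom_lt_zero_eq (by omega) hAt
        have hwrong : PySem.Chars.slice i (some ((sn : Nat) : Int))
            (some (PySem.Chars.findFrom i [c0] ((sn : Nat) : Int) + 1)) = [] := by
          rw [hAtm1]
          rw [PySem.Chars.slice_eq_listSlice]
          norm_num
          rw [PySem.List.slice_toNat _ (by omega) (by omega)]
          simp
        rw [hwrong]
        have hlower : PySem.Chars.lower ([] : List Char) = [] := by rfl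
        rw [hlower, pvReplace_nil_nil, hAtm1, pvALoop_neg (by omega)]
        -- B side also stops
        have hnoc0i : ∀ j, sn ≤ j → ¬ pvOcc [c0] i j := pvFindFrom_neg (by omega) hAt
        have hBt : PySem.Chars.findFrom (l.drop o) [c0] (((sn - o : Nat)) : Int) < 0 := by
          by_contra hcon
          have hpos := pvFindFrom_pos (m := l.drop o) (sub := [c0]) (k := sn - o)
            (by simp; omega) hcon
          obtain ⟨x, _, hx1, hoccx, _⟩ := hpos
          have hxlen : x < (l.drop o).length := (pvOccC0_iff.mp hoccx).1
          have hxc0 : pvAt (l.drop o) x = c0 := (pvOccC0_iff.mp hoccx).2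
          rw [pvAt_drop] at hxc0
          have hxl : o + x < l.length := by simp at hxlen; omega
          have : pvAt i (o + x) = c0 := (hc0pos (o + x) (by omega) hxl).mpr hxc0
          exact hnoc0i (o + x) (by omega) (pvOccC0_iff.mpr ⟨by omega, this⟩)
        have hBstop : pvBlow ss [c0] (l.drop o) = l.drop o := by
          apply pvBlow_stop
          right
          constructor
          · rw [hBs]; omega
          · rw [hBs]; exact hBt
        rw [hBstop]
        have hdropeq : i.drop o = l.drop o := by
          apply pvExt (by simp [hlen])
          intro q hq
          rw [pvAt_drop, pvAt_drop]
          have hql : o + q < l.length := by simp at hq; omega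
          rcases H4 (o + q) (by omega) hql with h | h
          · exact h
          · rw [hBstop] at h
            rw [h, pvAt_drop]
            congr 1
            omega
        conv_lhs => rw [← List.take_append_drop o i]
        rw [hdropeq]
      · -- MAIN STEP
        obtain ⟨tn, htni, hsn_tn, hocctn, htmin⟩ := pvFindFrom_pos (by omega : sn ≤ i.length) hAt
        have htn_lt : tn < i.length := (pvOccC0_iff.mp hocctn).1
        have hc0tn : pvAt i tn = c0 := (pvOccC0_iff.mp hocctn).2
        have hint : ∀ y, sn ≤ y → y < tn → pvAt i y ≠ c0 := by
          intro y h1 h2 hy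
          exact htmin y h1 h2 (pvOccC0_iff.mpr ⟨by omega, hy⟩)
        -- B-side second find
        have hBt : PySem.Chars.findFrom (l.drop o) [c0] (((sn - o : Nat)) : Int) = ((tn - o : Nat) : Int) := by
          have hocc' : pvOcc [c0] (l.drop o) (tn - o) := by
            apply pvOccC0_iff.mpr
            constructor
            · simp; omega
            · rw [pvAt_drop]
              have e : o + (tn - o) = tn := by omega
              rw [e]
              exact (hc0pos tn (by omega) (by omega)).mp hc0tn
          by_cases hneg : PySem.Chars.findFrom (l.drop o) [c0] (((sn - o : Nat)) : Int) < 0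
          · exfalso
            exact pvFindFrom_neg (by simp; omega) hneg (tn - o) (by omega) hocc'
          · have hpos := pvFindFrom_pos (m := l.drop o) (sub := [c0]) (k := sn - o)
              (by simp; omega) hneg
            obtain ⟨x, hx, hx1, hoccx, hminx⟩ := hpos
            rw [hx]
            congr 1
            have hxlen : x < (l.drop o).length := (pvOccC0_iff.mp hoccx).1
            have hxc0 : pvAt (l.drop o) x = c0 := (pvOccC0_iff.mp hoccx).2
            rw [pvAt_drop] at hxc0
            have hxl : o + x < l.length := by simp at hxlen; omega
            have hxi : pvAt i (o + x) = c0 := (hc0pos (o + x) (by omega) hxl).mpr hxc0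
            have h1 : ¬ x < tn - o := by
              intro hlt
              by_cases hxsn : o + x < tn
              · exact hint (o + x) (by omega) hxsn hxi
              · omega
            have h2 : ¬ tn - o < x := fun hlt => hminx (tn - o) (by omega) hlt hocc'
            omega
        -- the replaced text w
        set w : List Char := (i.drop sn).take (tn + 1 - sn) with hwdef
        have hw_len : w.length = tn + 1 - sn := by simp [hwdef]; omega
        have hw_ne : w ≠ [] := by
          intro hcon
          have := congrArg List.length hcon
          rw [hw_len] at this
          simp at this
          omega
        have hw_at : ∀ j, j < w.length → pvAt w j = pvAt i (sn + j) := by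
          intro j hj
          rw [hwdef, pvAt_take (by rw [hw_len] at hj; omega), pvAt_drop]
        have hw_occ_sn : pvOcc w i sn := by
          rw [pvOcc, hwdef]
          exact List.take_prefix _ _
        have hwrong : PySem.Chars.slice i (some ((sn : Nat) : Int))
            (some (PySem.Chars.findFrom i [c0] ((sn : Nat) : Int) + 1)) = w := by
          rw [htni, PySem.Chars.slice_eq_listSlice, PySem.List.slice_toNat _ (by omega) (by omega)]
          have f1 : ((sn : Int)).toNat = sn := by omega
          have f2 : ((tn : Int) + 1).toNat = tn + 1 := by omega
          rw [f1, f2, hwdef]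
        rw [hwrong, htni, pvReplace_eq_grep hw_ne]
        -- unfold the B-side scan once
        have hrest_ne : (l.drop o).length ≠ 0 := by simp; omega
        have hblow : pvBlow ss [c0] (l.drop o) =
            (l.drop o).take (sn - o)
              ++ (((l.drop o).drop (sn - o)).take ((tn - o) + 1 - (sn - o))).map PySem.Chars.lowerChar
              ++ pvBlow ss [c0] (l.drop (tn + 1)) := by
          rw [pvBlow_step hrest_ne hBs hBt]
          have e3 : (l.drop o).drop (tn - o + 1) = l.drop (tn + 1) := by
            rw [List.drop_drop]; congr 1; omega
          rw [e3]
        set Al : List Char := (l.drop o).take (sn - o) with hAldef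
        set Bl : List Char := (((l.drop o).drop (sn - o)).take ((tn - o) + 1 - (sn - o))).map PySem.Chars.lowerChar with hBldef
        have hAllen : Al.length = sn - o := by simp [hAldef]; omega
        have hBllen : Bl.length = tn + 1 - sn := by simp [hBldef]; omega
        have hAl_at : ∀ x, x < sn - o → pvAt Al x = pvAt l (o + x) := by
          intro x hx
          rw [hAldef, pvAt_take hx, pvAt_drop]
        have hBl_at : ∀ j, j < tn + 1 - sn → pvAt Bl j = PySem.Chars.lowerChar (pvAt l (sn + j)) := by
          intro j hj
          rw [hBldef, pvAt_map (by simp; omega), pvAt_take (by omega), pvAt_drop, pvAt_drop]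
          congr 2
          omega
        -- characters of i and l agree strictly between o and sn
        have hIeqL : ∀ q, o ≤ q → q < sn → pvAt i q = pvAt l q := by
          intro q h1 h2
          rcases H4 q h1 (by omega) with h | h
          · exact h
          · rw [hblow] at h
            rw [h, pvAt3_lo (by rw [hAllen]; omega), hAl_at (q - o) (by omega)]
            congr 1
            omega
        -- the interior of w is c0-free, its last character is c0
        have hw_last : pvAt w (tn - sn) = c0 := by
          rw [hw_at _ (by omega)]
          have e : sn + (tn - sn) = tn := by omega
          rw [e]; exact hc0tn
        have htake_len : (i.take sn).length = sn := by simp; omega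
        have hocc_w_props : ∀ r, pvOcc w i r → ∀ j, j < w.length → pvAt i (r + j) = pvAt w j :=
          fun r h j hj => ((pvOcc_iff hw_ne).mp h).2 j hj
        have hhead_k : o ≠ 0 → ∀ r, pvOcc ss i r → r = o - 1 → False := by
          intro ho r hocc hre
          rcases hb with ⟨_, h2⟩ | ⟨_, _, _, h4⟩
          · omega
          · have hhead := pvOcc_head hss hocc
            rw [hre, h4] at hhead
            exact hnp ((pvC0_prefix_iff hss).mpr hhead.symm)
        by_cases hcase : ss.length ≤ w.length
        · -- =========== CASE: the slice contains the whole start symbol ===========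
          have hss_w : ss <+: w := by
            rw [pvPrefix_iff]
            refine ⟨hcase, fun j hj => ?_⟩
            rw [hw_at j (by omega)]
            exact ((pvOcc_iff hss).mp hoccsn).2 j (by omega)
          have hoccw_ss : ∀ r, pvOcc w i r → pvOcc ss i r := fun r h => hss_w.trans h
          have hocc_w_last : ∀ r, pvOcc w i r → pvAt i (r + (tn - sn)) = c0 := by
            intro r h
            rw [hocc_w_props r h (tn - sn) (by omega), hw_last]
          have hocc_w_int : ∀ r, pvOcc w i r → ∀ j, j < tn - sn → pvAt i (r + j) ≠ c0 := by
            intro r h j hj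
            rw [hocc_w_props r h j (by omega), hw_at j (by omega)]
            exact hint (sn + j) (by omega) (by omega)
          have hbound_r : ∀ r, pvOcc w i r → r < sn → r + w.length ≤ o := by
            intro r hocc hrsn
            have hoccss := hoccw_ss r hocc
            have hro : r < k := by
              by_contra hcon
              by_cases hko : r = o - 1
              · rcases hb with ⟨h1, h2⟩ | ⟨h1, h2, h3, h4⟩
                · exact hsmin r (by omega) hrsn hoccss
                · exact hhead_k (by omega) r hoccss hko
              · exact hsmin r (by omega) hrsn hoccss
            have ho1 : 1 ≤ o := by omega
            rcases hb with ⟨h1, h2⟩ | ⟨h1, h2, h3, h4⟩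
            · omega
            · by_contra hcon
              have hk_eq : k = o - 1 := by omega
              have hj : o - 1 - r < tn - sn := by rw [hw_len] at hcon; omega
              have := hocc_w_int r hocc (o - 1 - r) hj
              rw [show r + (o - 1 - r) = o - 1 by omega] at this
              exact this h4
          have hsplit := pvGrep_split (new := PySem.Chars.lower w) hw_ne i sn
            (fun r hr hocc => by have := hbound_r r hocc hr; omega)
          have hfix1 : pvGrep w (PySem.Chars.lower w) (i.take sn) = i.take sn := by
            apply pvGrep_fixed hw_ne
            intro r hocc j hj
            have hrb := pvOcc_length hw_ne hocc
            rw [htake_len] at hrb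
            have hocci : pvOcc w i r := (pvOcc_take_iff hw_ne (by omega)).mp hocc
            have hro2 : r + w.length ≤ o := hbound_r r hocci (by omega)
            have hw1 : 1 ≤ w.length := List.length_pos_of_ne_nil hw_ne
            have ho1 : 1 ≤ o := by omega
            have hoccss := hoccw_ss r hocci
            have hrk : r < k := by
              by_contra hcon
              by_cases hko : r = o - 1
              · rcases hb with ⟨h1, h2⟩ | ⟨h1, h2, h3, h4⟩
                · omega
                · exact hhead_k (by omega) r hoccss hko
              · exact hsmin r (by omega) (by omega) hoccss
            have hx : r + j < sn := by omega
            rw [pvAt_take hx]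
            apply H2 r (r + j) (by rw [hstk]; exact_mod_cast hrk) hoccss (by omega) (by omega)
            intro y hy1 hy2
            have := hocc_w_int r hocci (y - r) (by rw [hw_len] at hj; omega)
            rwa [show r + (y - r) = y by omega] at this
          have hocc_drop : pvOcc w (i.drop sn) 0 := by
            rw [pvOcc, List.drop_zero]
            exact hw_occ_sn
          have hdrop_eq : (i.drop sn).drop w.length = i.drop (tn + 1) := by
            rw [List.drop_drop]; congr 1; omega
          have hfix2 : pvGrep w (PySem.Chars.lower w) (i.drop sn)
              = PySem.Chars.lower w ++ pvGrep w (PySem.Chars.lower w) (i.drop (tn+1)) := by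
            rw [pvGrep_head hw_ne hocc_drop, hdrop_eq]
          have hidecomp : pvGrep w (PySem.Chars.lower w) i = (i.take sn ++ PySem.Chars.lower w) ++ (pvGrep w (PySem.Chars.lower w) (i.drop (tn+1))) := by
            rw [hsplit, hfix1, hfix2, List.append_assoc]
          have hlow_len : (PySem.Chars.lower w).length = w.length := by
            simp [PySem.Chars.lower]
          have hG_len : (pvGrep w (PySem.Chars.lower w) (i.drop (tn+1))).length = i.length - (tn+1) := by
            rw [pvGrep_len hw_ne (by simp [PySem.Chars.lower])]
            simp
          have hi'_len : (pvGrep w (PySem.Chars.lower w) i).length = l.length := by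
            rw [pvGrep_len hw_ne (by simp [PySem.Chars.lower]), hlen]
          have hAB_len : (i.take sn ++ PySem.Chars.lower w).length = tn + 1 := by
            rw [List.length_append, htake_len, hlow_len, hw_len]; omega
          have hi'_at_lo : ∀ q, q < sn → pvAt (pvGrep w (PySem.Chars.lower w) i) q = pvAt i q := by
            intro q hq
            rw [hidecomp, pvAt3_lo (by rw [htake_len]; omega), pvAt_take hq]
          have hi'_at_mid : ∀ q, sn ≤ q → q ≤ tn → pvAt (pvGrep w (PySem.Chars.lower w) i) q = PySem.Chars.lowerChar (pvAt i q) := by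
            intro q h1 h2
            rw [hidecomp, pvAt3_mid (by rw [htake_len]; omega) (by rw [htake_len, hlow_len, hw_len]; omega)]
            rw [htake_len, PySem.Chars.lower, pvAt_map (by rw [hw_len]; omega), hw_at (q - sn) (by rw [hw_len]; omega)]
            congr 2
            omega
          have hi'_at_hi : ∀ q, tn + 1 ≤ q → pvAt (pvGrep w (PySem.Chars.lower w) i) q = pvAt (pvGrep w (PySem.Chars.lower w) (i.drop (tn+1))) (q - (tn+1)) := by
            intro q hq
            rw [hidecomp, pvAt3_hi (by rw [htake_len, hlow_len, hw_len]; omega)]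
            congr 1
            rw [htake_len, hlow_len, hw_len]
            omega
          have hrel_i'_i : pvRel (pvGrep w (PySem.Chars.lower w) i) i := by
            constructor
            · rw [hi'_len, hlen]
            · intro q
              by_cases h1 : q < sn
              · rw [hi'_at_lo q h1]; exact Or.inl rfl
              by_cases h2 : q ≤ tn
              · rw [hi'_at_mid q (by omega) h2]; exact Or.inr rfl
              by_cases h3 : q < i.length
              · rw [hi'_at_hi q (by omega)]
                have hq' : q - (tn+1) < (i.drop (tn+1)).length := by simp; omega
                rcases pvGrep_point hw_ne (i.drop (tn+1)) (q - (tn+1)) hq' with h | ⟨h, _⟩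
                · rw [h, pvAt_drop, show tn+1 + (q - (tn+1)) = q by omega]
                  exact Or.inl rfl
                · rw [h, pvAt_drop, show tn+1 + (q - (tn+1)) = q by omega]
                  exact Or.inr rfl
              · rw [pvAt_oob (by rw [hi'_len, ← hlen]; omega), pvAt_oob (by omega)]
                exact Or.inl rfl
          have hc0_i'_iff : ∀ y, (pvAt (pvGrep w (PySem.Chars.lower w) i) y = c0 ↔ pvAt i y = c0) :=
            fun y => pvRelAt_c0 hLFc0 (hrel_i'_i.2 y)
          have hocc_i'_iff : ∀ r, pvOcc ss (pvGrep w (PySem.Chars.lower w) i) r ↔ pvOcc ss i r := pvOcc_transfer hrel_i'_i hLFss hss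
          have hi'_tn : pvAt (pvGrep w (PySem.Chars.lower w) i) tn = c0 := by
            rw [hi'_at_mid tn (by omega) le_rfl, hc0tn, pvLch_LF_fix hLFc0]
          have hIH := ih (pvGrep w (PySem.Chars.lower w) i) ((tn : Nat) : Int) (tn + 1) (hi'_len) (by omega) ?bnd ?h2' ?h4'
          case bnd =>
            right
            refine ⟨by push_cast; ring, by omega, by omega, ?_⟩
            rw [show tn + 1 - 1 = tn by omega]
            exact hi'_tn
          case h2' =>
            intro r x hr hocc hrx hxlen hnoc0
            have hrtn : r < tn := by exact_mod_cast hr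
            have hocci : pvOcc ss i r := (hocc_i'_iff r).mp hocc
            have hnoc0i : ∀ y, r ≤ y → y < x → pvAt i y ≠ c0 := by
              intro y h1 h2 hc
              exact hnoc0 y h1 h2 ((hc0_i'_iff y).mpr hc)
            by_cases hz1 : sn ≤ r
            · have hxtn : x ≤ tn := by
                by_contra hcon
                exact hnoc0 tn (by omega) (by omega) hi'_tn
              rw [hi'_at_mid x (by omega) hxtn, pvLch_idem]
            · push_neg at hz1
              have hrk : r < k := by
                by_contra hcon
                by_cases hko : r = o - 1
                · rcases hb with ⟨h1, h2⟩ | ⟨h1, h2, h3, h4⟩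
                  · exact hsmin r (by omega) hz1 hocci
                  · exact hhead_k (by omega) r hocci hko
                · exact hsmin r (by omega) hz1 hocci
              have ho1 : 1 ≤ o := by omega
              rcases hb with ⟨h1, h2⟩ | ⟨h1, h2, h3, h4⟩
              · omega
              · have hk_eq : k = o - 1 := by omega
                by_cases hx_sn : x < sn
                · rw [hi'_at_lo x hx_sn]
                  have hnoc0i' : ∀ y, r ≤ y → y < x → pvAt i y ≠ c0 := hnoc0i
                  apply H2 r x (by rw [hstk]; exact_mod_cast hrk) hocci hrx hxlen hnoc0i'
                · exfalso
                  apply hnoc0 k (by omega) (by omega)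
                  rw [hi'_at_lo k (by omega), hk_eq]
                  exact h4
          case h4' =>
            intro q hq hqlen
            rw [hi'_at_hi q hq]
            have hq' : q - (tn+1) < (i.drop (tn+1)).length := by simp; omega
            rcases pvGrep_point hw_ne (i.drop (tn+1)) (q - (tn+1)) hq' with h | ⟨h, r', hr'1, hr'2, hoccw'⟩
            · rw [h, pvAt_drop, show tn+1 + (q - (tn+1)) = q by omega]
              rcases H4 q (by omega) hqlen with h2 | h2
              · exact Or.inl h2
              · right
                rw [h2, hblow, pvAt3_hi (by rw [hAllen, hBllen]; omega), hAllen, hBllen]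
                congr 1
                omega
            · right
              have hoccwi : pvOcc w i (tn + 1 + r') := by
                rw [← pvOcc_drop_iff]; exact hoccw'
              have hrlen : tn + 1 + r' + w.length ≤ i.length := pvOcc_length hw_ne hoccwi
              have hoccssl : pvOcc ss (l.drop (tn+1)) r' := by
                have h1 : pvOcc ss i (tn + 1 + r') := hoccw_ss _ hoccwi
                have h2 : pvOcc ss (l.drop o) (tn + 1 + r' - o) := by
                  apply (pvOcc_transfer hrel hLFss hss _).mp
                  rw [pvOcc_drop_iff, show o + (tn + 1 + r' - o) = tn + 1 + r' by omega]
                  exact h1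
                rw [pvOcc_drop_iff] at h2
                rw [pvOcc_drop_iff, show tn + 1 + r' = o + (tn + 1 + r' - o) by omega]
                exact h2
              have he_lt : tn + 1 + r' + (tn - sn) < l.length := by
                rw [← hlen]
                rw [hw_len] at hrlen
                omega
              have hc0e_l : pvAt l (tn + 1 + r' + (tn - sn)) = c0 := by
                apply (hc0pos (tn + 1 + r' + (tn - sn)) (by omega) he_lt).mp
                exact hocc_w_last _ hoccwi
              have hint_l : ∀ y, tn + 1 + r' ≤ y → y < tn + 1 + r' + (tn - sn) → pvAt l y ≠ c0 := by
                intro y h1 h2 hc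
                apply hocc_w_int _ hoccwi (y - (tn + 1 + r')) (by omega)
                rw [show tn + 1 + r' + (y - (tn + 1 + r')) = y by omega]
                exact (hc0pos y (by omega) (by omega)).mpr hc
              have hcover := pvCover (c0 := c0) hss (l.drop (tn+1)) r' (r' + (tn - sn)) hoccssl
                (by simp; omega)
                (by rw [pvAt_drop, show (tn+1) + (r' + (tn - sn)) = tn + 1 + r' + (tn - sn) by omega]
                    exact hc0e_l)
                (by omega)
                (by intro y h1 h2
                    rw [pvAt_drop]
                    exact hint_l (tn+1+y) (by omega) (by omega))
                (q - (tn+1)) hr'1 (by rw [hw_len] at hr'2; omega)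
              rw [h, hcover, pvAt_drop, pvAt_drop, show (tn+1) + (q - (tn+1)) = q by omega]
              exact hlch q (by omega) hqlen
          rw [hIH, hblow]
          have htake : (pvGrep w (PySem.Chars.lower w) i).take (tn+1) = i.take sn ++ PySem.Chars.lower w := by
            rw [hidecomp]
            exact List.take_left' hAB_len
          rw [htake]
          have htko : i.take sn = i.take o ++ Al := by
            rw [show sn = o + (sn - o) by omega, List.take_add]
            congr 1
            apply pvExt
            · rw [hAllen]; simp; omega
            · intro x hx
              have hx' : x < sn - o := by simp at hx; omega
              rw [pvAt_take hx', pvAt_drop, hAl_at x hx']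
              exact hIeqL (o + x) (by omega) (by omega)
          have hloww : PySem.Chars.lower w = Bl := by
            apply pvExt
            · rw [hlow_len, hw_len, hBllen]
            · intro j hj
              rw [hlow_len, hw_len] at hj
              rw [PySem.Chars.lower, pvAt_map (by rw [hw_len]; omega), hw_at j (by rw [hw_len]; omega),
                hBl_at j hj]
              exact hlch (sn + j) (by omega) (by omega)
          rw [htko, hloww]
          simp [List.append_assoc]
        · -- =========== CASE: the stop symbol sits inside the start symbol: no-op replace ===========
          push_neg at hcase
          have hwLF : ∀ j, j < w.length → pvLetterFree (pvAt w j) = true := by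
            intro j hj
            rw [hw_at j hj, ((pvOcc_iff hss).mp hoccsn).2 j (by omega)]
            exact hLFss _ (pvAt_mem (by omega))
          have hfixall : pvGrep w (PySem.Chars.lower w) i = i := by
            apply pvGrep_fixed hw_ne
            intro r hocc j hj
            rw [hocc_w_props r hocc j hj]
            exact pvLch_LF_fix (hwLF j hj)
          rw [hfixall]
          have hIH := ih i ((tn : Nat) : Int) (tn + 1) hlen (by omega) ?bnd2 ?h2s ?h4s
          case bnd2 =>
            right
            refine ⟨by push_cast; ring, by omega, by omega, ?_⟩
            rw [show tn + 1 - 1 = tn by omega]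
            exact hc0tn
          case h2s =>
            intro r x hr hocc hrx hxlen hnoc0
            have hrtn : r < tn := by exact_mod_cast hr
            by_cases hz1 : sn ≤ r
            · have hxtn : x ≤ tn := by
                by_contra hcon
                exact hnoc0 tn (by omega) (by omega) hc0tn
              rw [show x = sn + (x - sn) by omega, ← hw_at (x - sn) (by rw [hw_len]; omega)]
              exact pvLch_LF_fix (hwLF (x - sn) (by rw [hw_len]; omega))
            · push_neg at hz1
              have hrk : r < k := by
                by_contra hcon
                by_cases hko : r = o - 1
                · rcases hb with ⟨h1, h2⟩ | ⟨h1, h2, h3, h4⟩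
                  · exact hsmin r (by omega) hz1 hocc
                  · exact hhead_k (by omega) r hocc hko
                · exact hsmin r (by omega) hz1 hocc
              have ho1 : 1 ≤ o := by omega
              rcases hb with ⟨h1, h2⟩ | ⟨h1, h2, h3, h4⟩
              · omega
              · have hk_eq : k = o - 1 := by omega
                by_cases hx_sn : x < sn
                · exact H2 r x (by rw [hstk]; exact_mod_cast hrk) hocc hrx hxlen hnoc0
                · exfalso
                  apply hnoc0 k (by omega) (by omega)
                  rw [hk_eq]
                  exact h4
          case h4s =>
            intro q hq hqlen
            rcases H4 q (by omega) hqlen with h2 | h2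
            · exact Or.inl h2
            · right
              rw [h2, hblow, pvAt3_hi (by rw [hAllen, hBllen]; omega), hAllen, hBllen]
              congr 1
              omega
          rw [hIH, hblow]
          have htko : i.take (tn + 1) = (i.take o ++ Al) ++ w := by
            rw [show tn + 1 = (o + (sn - o)) + (tn + 1 - sn) by omega, List.take_add, List.take_add]
            congr 1
            · congr 1
              apply pvExt
              · rw [hAllen]; simp; omega
              · intro x hx
                have hx' : x < sn - o := by simp at hx; omega
                rw [pvAt_take hx', pvAt_drop, hAl_at x hx']
                exact hIeqL (o + x) (by omega) (by omega)
            · rw [show o + (sn - o) = sn by omega, hwdef]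
          have hwBl : w = Bl := by
            apply pvExt
            · rw [hw_len, hBllen]
            · intro j hj
              rw [hw_len] at hj
              rw [hw_at j (by rw [hw_len]; omega), hBl_at j hj]
              have hiLF : pvLetterFree (pvAt i (sn + j)) = true := by
                rw [← hw_at j (by rw [hw_len]; omega)]
                exact hwLF j (by rw [hw_len]; omega)
              have hieq : pvAt i (sn + j) = pvAt l (sn + j) :=
                pvLF_forces_eq hiLF (hIvsL (sn + j) (by omega) (by omega))
              rw [← hieq, pvLch_LF_fix hiLF]
          rw [htko, hwBl]
          simp [List.append_assoc]


-- ---------- the trivial lines: a missing symbol means nothing changes ----------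
theorem pvNoOcc_of_isIn_false {sub l : List Char} (h : PySem.Chars.isIn sub l = false) :
    ∀ j, ¬ pvOcc sub l j := by
  intro j hocc
  rw [PySem.Chars.isIn_eq_false_iff] at h
  exact h (hocc.isInfix.trans (List.drop_suffix _ _).isInfix)

theorem pvFindFrom_neg_of_noOcc {m sub : List Char} {k : Nat} (hk : k ≤ m.length)
    (h : ∀ j, k ≤ j → ¬ pvOcc sub m j) : PySem.Chars.findFrom m sub (k : Int) < 0 := by
  by_contra hcon
  obtain ⟨s, _, hks, hocc, _⟩ := pvFindFrom_pos hk hcon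
  exact h s hks hocc

theorem pvALoop_trivial {ss ts : List Char} (l : List Char)
    (h : PySem.Chars.isIn ss l = false ∨ PySem.Chars.isIn ts l = false) :
    pvALoop ss ts (l.length + 2) l 0 = l := by
  have e : l.length + 2 = (l.length + 1) + 1 := rfl
  rw [e, pvALoop_succ _ _ _ _ _ (by omega)]
  by_cases hs : PySem.Chars.findFrom l ss 0 < 0
  · rw [if_pos hs]
  · rw [if_neg hs]
    have hts : PySem.Chars.isIn ts l = false := by
      rcases h with h | h
      · exfalso
        apply hs
        have : PySem.Chars.findFrom l ss ((0 : Nat) : Int) < 0 :=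
          pvFindFrom_neg_of_noOcc (by omega) (fun j _ => pvNoOcc_of_isIn_false h j)
        simpa using this
      · exact h
    have hs0 : ¬ PySem.Chars.findFrom l ss ((0 : Nat) : Int) < 0 := by simpa using hs
    obtain ⟨sn, hsn, _, _, _⟩ := pvFindFrom_pos (by omega) hs0
    rw [Nat.cast_zero] at hsn
    have hsn_le : sn ≤ l.length := by
      have h1 := PySem.Chars.find_le_length l ss
      rw [← PySem.Chars.findFrom_zero, hsn] at h1
      omega
    rw [hsn]
    have htneg : PySem.Chars.findFrom l ts ((sn : Nat) : Int) < 0 :=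
      pvFindFrom_neg_of_noOcc hsn_le (fun j _ => pvNoOcc_of_isIn_false hts j)
    have htm1 : PySem.Chars.findFrom l ts ((sn : Nat) : Int) = -1 :=
      pvFindFrom_lt_zero_eq hsn_le htneg
    rw [htm1]
    have hwrong : PySem.Chars.slice l (some ((sn : Nat) : Int)) (some (-1 + 1)) = [] := by
      norm_num
      rw [PySem.List.slice_toNat _ (by omega) (by omega)]
      simp
    rw [hwrong]
    have hlower : PySem.Chars.lower ([] : List Char) = [] := rfl
    rw [hlower, pvReplace_nil_nil, pvALoop_neg (by omega)]

theorem pvBLoop_trivial {ss ts : List Char} (l : List Char)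
    (h : PySem.Chars.isIn ss l = false ∨ PySem.Chars.isIn ts l = false) :
    (pvBLoop ss ts (l.length + 2) l []).flatten = l := by
  have e : l.length + 2 = (l.length + 1) + 1 := rfl
  rw [e, pvBLoop]
  by_cases hs : PySem.Chars.find l ss < 0
  · rw [if_pos hs]; simp
  · rw [if_neg hs]
    have hts : PySem.Chars.isIn ts l = false := by
      rcases h with h | h
      · exfalso
        apply hs
        have : PySem.Chars.findFrom l ss ((0 : Nat) : Int) < 0 :=
          pvFindFrom_neg_of_noOcc (by omega) (fun j _ => pvNoOcc_of_isIn_false h j)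
        simpa using this
      · exact h
    have hs0 : ¬ PySem.Chars.findFrom l ss ((0 : Nat) : Int) < 0 := by simpa using hs
    obtain ⟨sn, hsn, _, _, _⟩ := pvFindFrom_pos (by omega) hs0
    rw [Nat.cast_zero, PySem.Chars.findFrom_zero] at hsn
    have hsn_le : sn ≤ l.length := by
      have h1 := PySem.Chars.find_le_length l ss
      rw [hsn] at h1
      omega
    have htneg : PySem.Chars.findFrom l ts (PySem.Chars.find l ss) < 0 := by
      rw [hsn]
      exact pvFindFrom_neg_of_noOcc hsn_le (fun j _ => pvNoOcc_of_isIn_false hts j)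
    rw [if_pos htneg]
    simp

-- ---------- per-line equality in the strict symbol case ----------
theorem pvLine_strict {ss : List Char} {c0 : Char} (hss : ss ≠ [])
    (hLFss : ∀ c ∈ ss, pvLetterFree c = true) (hLFc0 : pvLetterFree c0 = true)
    (hnp : ¬ [c0] <+: ss) (l : List Char) :
    pvALoop ss [c0] (l.length + 2) l 0 = (pvBLoop ss [c0] (l.length + 2) l []).flatten := by
  rw [pvBLoop_flatten hss _ _ _ (by omega)]
  have hmain := pvMain hss hLFss hLFc0 hnp l (l.length + 2) l 0 0 rfl (by omega)
    (Or.inl ⟨rfl, rfl⟩)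
    (by intro r x hr h1 h2 h3 h4; exfalso; omega)
    (by intro q hq hql; exact Or.inl rfl)
  rw [hmain]
  simp



-- ===== VERDICT (by name: the statement is the Claim_ definition above) =====
theorem lower_case_linkage_spec : Claim_equal_lower_case_linkage := by
  unfold Claim_equal_lower_case_linkage
  intro lines ssS tsS _ hpre
  unfold Spec_lower_case_linkage lower_case_linkage lower_case_linkage_alt
  apply List.map_congr_left
  intro line hline
  congr 1
  rw [pvJoin_nil_flatten]
  rcases hpre with htriv | ⟨hne, hlen1, hLFs, hLFt, hnp⟩
  · have hcond : PySem.Chars.isIn ssS.toList line.toList = false ∨ PySem.Chars.isIn tsS.toList line.toList = false := by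
      have h0 := (List.all_eq_true.mp htriv) line hline
      simp only [Bool.or_eq_true, Bool.not_eq_true'] at h0
      rcases h0 with h | h
      · exact Or.inl (by simpa using h)
      · exact Or.inr (by simpa using h)
    rw [pvALoop_trivial line.toList hcond, pvBLoop_trivial line.toList hcond]
  · obtain ⟨c0, hts⟩ := List.length_eq_one_iff.mp hlen1
    rw [hts]
    exact pvLine_strict hne (fun c hc => List.all_eq_true.mp hLFs c hc)
      (by have := List.all_eq_true.mp hLFt c0 (by rw [hts]; simp); exact this)
      (by rw [hts] at hnp; exact hnp) line.toList
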